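-- pv_equiv track=rewrite | github.com/limsubinn/Algorithm | Programmers/LV2/132265.py | solution
-- ===== SOURCE A (Python) =====
-- from collections import Counter
--
-- def solution(topping):
--     answer = 0
--     t1 = Counter(topping)
--     t2 = set()
--
--     for i in topping:
--         t1[i] -= 1
--         if t1[i] == 0:
--             t1.pop(i)
--         t2.add(i)
--
--         if len(t1) == len(t2):
--             answer += 1
--     return answer
-- ===== SOURCE B (Python) =====
-- def solution(topping):
--     # backward pass: suffix[i] = number of distinct toppings strictly after index i
--     suffix = []
--     seen = set()
--     for x in reversed(topping):
--         suffix.append(len(seen))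
--         seen.add(x)
--     suffix.reverse()
--     # forward pass: compare distinct count of the left half (incl. current) with the table
--     answer = 0
--     left = set()
--     for x, s in zip(topping, suffix):
--         left.add(x)
--         if len(left) == s:
--             answer += 1
--     return answer
-- ===== Notes on version B (the rewrite author's own statement) =====
-- stated objective: alternative
-- what changed: A fuses everything into one pass that decrements a live Counter of the right half (with per-element dict decrement and pop); B precomputes a suffix-distinct table in a backward pass with a plain set and then does a simple forward scan comparing the left set's size against the table.
import Mathlib
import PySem

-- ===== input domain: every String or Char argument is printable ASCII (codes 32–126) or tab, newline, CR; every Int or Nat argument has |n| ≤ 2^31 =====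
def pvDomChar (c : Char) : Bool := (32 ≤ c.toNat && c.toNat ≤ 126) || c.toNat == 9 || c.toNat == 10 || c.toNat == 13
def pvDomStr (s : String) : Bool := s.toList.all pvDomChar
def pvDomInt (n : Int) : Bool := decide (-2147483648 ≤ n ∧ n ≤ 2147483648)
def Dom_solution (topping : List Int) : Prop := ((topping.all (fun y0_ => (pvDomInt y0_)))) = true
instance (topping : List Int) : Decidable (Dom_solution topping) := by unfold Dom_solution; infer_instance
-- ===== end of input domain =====

-- B replaces A's fused single pass (live Counter of the remaining suffix) by a precomputed
-- suffix-distinct table plus a forward scan over a growing set; same cost, different decomposition.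

-- ===== PORT A =====
-- the loop body of A: t1[i] -= 1; if t1[i] == 0: t1.pop(i); t2.add(i); if len(t1)==len(t2): answer += 1
-- ('t1.pop(i)' is ported as Dict.erase: after 't1[i] -= 1' the key i is always present, so pop never raises)
def solutionLoop (t1 : PySem.Dict Int Int) (t2 : PySem.Set Int) (answer : Int) : List Int → Int
  | [] => answer
  | i :: rest =>
    let t1a := t1.modify i 0 (· - 1)
    let t1b := if t1a.getD i 0 = 0 then t1a.erase i else t1a
    let t2' := t2.add i
    let answer' := if (t1b.size : Int) = PySem.Set.len t2' then answer + 1 else answer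
    solutionLoop t1b t2' answer' rest

def solution (topping : List Int) : Int :=
  solutionLoop (PySem.Dict.counter topping) PySem.Set.empty 0 topping

-- ===== PORT B =====
-- backward pass of Source B: for x in reversed(topping): suffix.append(len(seen)); seen.add(x)
def solutionAltBack (suffix : List Int) (seen : PySem.Set Int) : List Int → List Int × PySem.Set Int
  | [] => (suffix, seen)
  | x :: rest => solutionAltBack (suffix ++ [PySem.Set.len seen]) (seen.add x) rest

-- forward pass of Source B: for x, s in zip(topping, suffix): left.add(x); if len(left)==s: answer += 1
def solutionAltFwd (left : PySem.Set Int) (answer : Int) : List (Int × Int) → Int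
  | [] => answer
  | (x, s) :: rest =>
    let left' := left.add x
    solutionAltFwd left' (if PySem.Set.len left' = s then answer + 1 else answer) rest

def solution_alt (topping : List Int) : Int :=
  let bp := solutionAltBack [] PySem.Set.empty topping.reverse
  let suffix := bp.1.reverse
  solutionAltFwd PySem.Set.empty 0 (topping.zip suffix)

-- ===== PRECONDITION & SPEC =====
def Spec_solution (topping : List Int) (out : Int) : Prop := out = solution_alt topping
instance (topping : List Int) (out : Int) : Decidable (Spec_solution topping out) := by unfold Spec_solution; infer_instance

-- ===== CLAIM (what is proved, stated in full; the proofs are below) =====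
def Claim_equal_solution : Prop := ∀ (topping : List Int), Dom_solution topping → Spec_solution topping (solution topping)

-- ===== LEMMAS AND PROOFS =====

-- the mathematical suffix-distinct table: entry for x :: r is the number of distinct elements of r
def sufList : List Int → List Int
  | [] => []
  | _ :: r => ((PySem.Set.ofList r).length : Int) :: sufList r

-- two nodup lists with the same members have the same length
lemma length_eq_of_nodup_of_mem_iff {l m : List Int} (hl : l.Nodup) (hm : m.Nodup)
    (h : ∀ k, k ∈ l ↔ k ∈ m) : l.length = m.length :=
  ((List.perm_ext_iff_of_nodup hl hm).2 h).length_eq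

lemma length_ofList_reverse (r : List Int) :
    (PySem.Set.ofList r.reverse).length = (PySem.Set.ofList r).length := by
  apply length_eq_of_nodup_of_mem_iff (PySem.Set.nodup_ofList _) (PySem.Set.nodup_ofList _)
  intro k; simp [PySem.Set.mem_ofList]

-- erase facts (erase filters the items list)
lemma getD_erase_self (d : PySem.Dict Int Int) (k : Int) (v : Int) :
    (d.erase k).getD k v = v := by
  simp only [PySem.Dict.erase, PySem.Dict.getD, PySem.Dict.get?]
  have hfind : List.find? (fun p => p.1 == k) (List.filter (fun p => !p.1 == k) d.items) = none := by
    rw [List.find?_eq_none]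
    intro p hp
    simp only [List.mem_filter] at hp
    simpa using hp.2
  rw [hfind]
  rfl

lemma get?_erase_of_ne (d : PySem.Dict Int Int) (k k' : Int) (h : k' ≠ k) :
    (d.erase k).get? k' = d.get? k' := by
  simp only [PySem.Dict.erase, PySem.Dict.get?]
  congr 1
  induction d.items with
  | nil => rfl
  | cons p rest ih =>
      by_cases hpk' : p.1 = k'
      · have hpk : ¬ p.1 = k := by rw [hpk']; exact h
        simp [hpk', h]
      · by_cases hpk : p.1 = k
        · simp [hpk, Ne.symm h, ih]
        · simp [hpk', hpk, ih]

lemma mem_keys_erase (d : PySem.Dict Int Int) (k k' : Int) :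
    k' ∈ (d.erase k).keys ↔ k' ∈ d.keys ∧ k' ≠ k := by
  simp only [PySem.Dict.erase, PySem.Dict.keys, List.mem_map, List.mem_filter]
  constructor
  · rintro ⟨p, ⟨hp, hne⟩, rfl⟩; exact ⟨⟨p, hp, rfl⟩, by simpa using hne⟩
  · rintro ⟨⟨p, hp, rfl⟩, hne⟩; exact ⟨p, ⟨hp, by simpa using hne⟩, rfl⟩

lemma nodup_keys_erase (d : PySem.Dict Int Int) (k : Int) (h : d.keys.Nodup) :
    (d.erase k).keys.Nodup := by
  simp only [PySem.Dict.erase, PySem.Dict.keys] at *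
  exact h.sublist (List.Sublist.map _ List.filter_sublist)

-- the A-side loop equals the B-side forward loop, given the Counter invariant
lemma loop_eq (rest : List Int) : ∀ (t1 : PySem.Dict Int Int) (s : PySem.Set Int) (ans : Int),
    t1.keys.Nodup → (∀ k, k ∈ t1.keys ↔ k ∈ rest) → (∀ k, t1.getD k 0 = rest.count k) →
    solutionLoop t1 s ans rest = solutionAltFwd s ans (rest.zip (sufList rest)) := by
  induction rest with
  | nil => intro t1 s ans _ _ _; simp [solutionLoop, sufList, solutionAltFwd]
  | cons i rest' ih =>
      intro t1 s ans hnd hmem hval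
      have hconti : i ∈ t1.keys := (hmem i).2 (by simp)
      have hcont : t1.contains i = true := (PySem.Dict.contains_iff_mem_keys t1 i).2 hconti
      have hkeysa : (t1.modify i 0 (· - 1)).keys = t1.keys := by
        rw [PySem.Dict.keys_modify, PySem.Dict.keys_insert_of_contains _ _ hcont]
      have hvala : ∀ k, (t1.modify i 0 (· - 1)).getD k 0 = rest'.count k := by
        intro k
        rw [PySem.Dict.getD_modify]
        by_cases hk : k = i
        · subst hk; rw [hval k]; simp [List.count_cons_self]
        · rw [if_neg hk, hval k, List.count_cons_of_ne (Ne.symm hk)]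
      set t1a := t1.modify i 0 (· - 1) with ht1a
      by_cases hz : t1a.getD i 0 = 0
      · -- i does not occur in rest'; the key is popped
        have hnotin : i ∉ rest' := by
          intro hmem0
          have hc := hvala i
          rw [hz] at hc
          have hpos : 0 < rest'.count i := List.count_pos_iff.2 hmem0
          omega
        have hnd' : (t1a.erase i).keys.Nodup := nodup_keys_erase _ _ (hkeysa ▸ hnd)
        have hmem' : ∀ k, k ∈ (t1a.erase i).keys ↔ k ∈ rest' := by
          intro k
          rw [mem_keys_erase, hkeysa, hmem k]
          constructor
          · rintro ⟨hk, hne⟩; rcases List.mem_cons.1 hk with h | h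
            · exact absurd h hne
            · exact h
          · intro h; exact ⟨List.mem_cons_of_mem _ h, fun he => hnotin (he ▸ h)⟩
        have hval' : ∀ k, (t1a.erase i).getD k 0 = rest'.count k := by
          intro k
          by_cases hk : k = i
          · subst hk; rw [getD_erase_self, List.count_eq_zero.2 hnotin]; simp
          · rw [PySem.Dict.getD, get?_erase_of_ne _ _ _ hk, ← PySem.Dict.getD, hvala k]
        have hsize : ((t1a.erase i).size : Int) = ((PySem.Set.ofList rest').length : Int) := by
          have : (t1a.erase i).keys.length = (PySem.Set.ofList rest').length :=
            length_eq_of_nodup_of_mem_iff hnd' (PySem.Set.nodup_ofList _)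
              (fun k => by rw [hmem' k, PySem.Set.mem_ofList])
          simp only [PySem.Dict.keys, List.length_map] at this
          exact_mod_cast this
        simp only [solutionLoop, ← ht1a, if_pos hz, sufList, List.zip_cons_cons, solutionAltFwd]
        rw [ih _ _ _ hnd' hmem' hval', hsize]
        congr 1
        by_cases hc : ((PySem.Set.ofList rest').length : Int) = PySem.Set.len (s.add i)
        · rw [if_pos hc, if_pos hc.symm]
        · rw [if_neg hc, if_neg (fun h => hc h.symm)]
      · -- i still occurs in rest'; the counter keeps the key
        have hin : i ∈ rest' := by
          by_contra h
          apply hz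
          rw [hvala i, List.count_eq_zero.2 h]
          simp
        have hnd' : t1a.keys.Nodup := hkeysa ▸ hnd
        have hmem' : ∀ k, k ∈ t1a.keys ↔ k ∈ rest' := by
          intro k; rw [hkeysa, hmem k]
          constructor
          · intro hk; rcases List.mem_cons.1 hk with h | h
            · exact h ▸ hin
            · exact h
          · exact List.mem_cons_of_mem _
        have hsize : (t1a.size : Int) = ((PySem.Set.ofList rest').length : Int) := by
          have : t1a.keys.length = (PySem.Set.ofList rest').length :=
            length_eq_of_nodup_of_mem_iff hnd' (PySem.Set.nodup_ofList _)
              (fun k => by rw [hmem' k, PySem.Set.mem_ofList])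
          simp only [PySem.Dict.keys, List.length_map] at this
          exact_mod_cast this
        simp only [solutionLoop, ← ht1a, if_neg hz, sufList, List.zip_cons_cons, solutionAltFwd]
        rw [ih _ _ _ hnd' hmem' hvala, hsize]
        congr 1
        by_cases hc : ((PySem.Set.ofList rest').length : Int) = PySem.Set.len (s.add i)
        · rw [if_pos hc, if_pos hc.symm]
        · rw [if_neg hc, if_neg (fun h => hc h.symm)]

-- the backward pass, characterized
lemma back_append (a b : List Int) : ∀ (suffix : List Int) (seen : PySem.Set Int),
    solutionAltBack suffix seen (a ++ b)
      = solutionAltBack (solutionAltBack suffix seen a).1 (solutionAltBack suffix seen a).2 b := by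
  induction a with
  | nil => intro suffix seen; rfl
  | cons x r ih => intro suffix seen; simp [solutionAltBack, ih]

lemma back_fst (l : List Int) : ∀ (suffix : List Int) (seen : PySem.Set Int),
    (solutionAltBack suffix seen l).1 = suffix ++ (solutionAltBack [] seen l).1 := by
  induction l with
  | nil => intro suffix seen; simp [solutionAltBack]
  | cons x r ih =>
      intro suffix seen
      simp only [solutionAltBack, List.nil_append]
      rw [ih (suffix ++ [PySem.Set.len seen]), ih [PySem.Set.len seen]]
      simp

lemma back_snd (l : List Int) : ∀ (suffix : List Int) (seen : PySem.Set Int),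
    (solutionAltBack suffix seen l).2 = PySem.Set.update seen l := by
  induction l with
  | nil => intro suffix seen; rfl
  | cons x r ih => intro suffix seen; rw [solutionAltBack, ih]; rfl

lemma back_eq_sufList (l : List Int) :
    (solutionAltBack [] PySem.Set.empty l.reverse).1.reverse = sufList l := by
  induction l with
  | nil => rfl
  | cons x r ih =>
      have hupd : PySem.Set.update PySem.Set.empty r.reverse = PySem.Set.ofList r.reverse := by
        rw [show (PySem.Set.empty : PySem.Set Int) = [] from rfl, PySem.Set.update_nil_left]
      rw [List.reverse_cons, back_append, solutionAltBack, solutionAltBack, back_fst,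
        List.reverse_append, back_snd, hupd]
      simp only [List.reverse_cons, List.reverse_nil, List.nil_append, sufList]
      rw [ih]
      simp [PySem.Set.len, length_ofList_reverse]

-- ===== VERDICT (by name: the statement is the Claim_ definition above) =====
theorem solution_spec : Claim_equal_solution := by
  intro topping _
  unfold Spec_solution solution solution_alt
  show solutionLoop (PySem.Dict.counter topping) PySem.Set.empty 0 topping
      = solutionAltFwd PySem.Set.empty 0
          (topping.zip (solutionAltBack [] PySem.Set.empty topping.reverse).1.reverse)
  rw [back_eq_sufList]
  exact loop_eq topping _ _ _ (PySem.Dict.nodup_keys_counter topping)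
    (fun k => by rw [PySem.Dict.keys_counter, PySem.Set.mem_ofList])
    (fun k => by rw [PySem.Dict.getD_counter])
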